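-- pv_equiv track=rewrite | github.com/hridaypradhan/tabrl-sft-evaluation | livesum_t3_full/scripts/run_livesum_stage1_schema_vllm.py | first_balanced_json_span
-- ===== SOURCE A (Python) =====
-- from typing import Any, Dict, List, Optional, Tuple
--
-- def first_balanced_json_span(s: str) -> Optional[Tuple[int, int]]:
--     """Find first {...} span with balanced braces (ignores braces inside strings)."""
--     in_str = False
--     esc = False
--     depth = 0
--     start = -1
--     for i, ch in enumerate(s):
--         if in_str:
--             if esc:
--                 esc = False
--             elif ch == "\\":
--                 esc = True
--             elif ch == '"':
--                 in_str = False
--             continue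
--         if ch == '"':
--             in_str = True
--         elif ch == "{":
--             if depth == 0:
--                 start = i
--             depth += 1
--         elif ch == "}":
--             if depth > 0:
--                 depth -= 1
--                 if depth == 0 and start != -1:
--                     return start, i + 1
--     return None
-- ===== SOURCE B (Python) =====
-- from typing import Optional, Tuple
--
-- def first_balanced_json_span(s: str) -> Optional[Tuple[int, int]]:
--     """Two-pass: first collect braces outside strings (with original indices), then balance them."""
--     toks = []
--     in_str = False
--     esc = False
--     for i, ch in enumerate(s):
--         if in_str:
--             if esc:
--                 esc = False
--             elif ch == "\\":
--                 esc = True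
--             elif ch == '"':
--                 in_str = False
--         elif ch == '"':
--             in_str = True
--         elif ch == "{" or ch == "}":
--             toks.append((i, ch))
--     depth = 0
--     start = -1
--     for i, ch in toks:
--         if ch == "{":
--             if depth == 0:
--                 start = i
--             depth += 1
--         else:
--             if depth > 0:
--                 depth -= 1
--                 if depth == 0 and start != -1:
--                     return start, i + 1
--     return None
-- ===== Notes on version B (the rewrite author's own statement) =====
-- stated objective: alternative
-- what changed: Single fused state machine split into two passes: one pass collects the (index, char) brace tokens outside strings, a separate pass balances that token list; two loops with disjoint state instead of one loop carrying all four variables.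
import Mathlib
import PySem

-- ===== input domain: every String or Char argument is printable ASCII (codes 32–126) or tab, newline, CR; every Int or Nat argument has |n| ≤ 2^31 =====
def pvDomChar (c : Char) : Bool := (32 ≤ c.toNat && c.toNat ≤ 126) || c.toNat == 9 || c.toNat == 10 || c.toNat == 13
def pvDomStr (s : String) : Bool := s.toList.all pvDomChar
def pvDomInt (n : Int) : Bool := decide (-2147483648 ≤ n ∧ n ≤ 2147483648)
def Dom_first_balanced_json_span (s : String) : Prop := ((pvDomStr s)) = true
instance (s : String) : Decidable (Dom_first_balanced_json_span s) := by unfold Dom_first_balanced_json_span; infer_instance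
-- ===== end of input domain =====

-- B splits A's fused scanner into two passes (collect out-of-string brace tokens, then balance them); same O(n) cost, different decomposition.


-- ===== PORT A =====
-- Literal port of A's single loop: state (in_str, esc, depth, start), early return on close to depth 0.
def fbjsGoA : List Char → Int → Bool → Bool → Int → Int → Option (Int × Int)
  | [], _, _, _, _, _ => none
  | ch :: rest, i, in_str, esc, depth, start =>
    if in_str then
      if esc then fbjsGoA rest (i+1) in_str false depth start
      else if ch = '\\' then fbjsGoA rest (i+1) in_str true depth start
      else if ch = '"' then fbjsGoA rest (i+1) false esc depth start
      else fbjsGoA rest (i+1) in_str esc depth start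
    else if ch = '"' then fbjsGoA rest (i+1) true esc depth start
    else if ch = '{' then
      fbjsGoA rest (i+1) in_str esc (depth+1) (if depth = 0 then i else start)
    else if ch = '}' then
      if depth > 0 then
        if depth - 1 = 0 ∧ start ≠ -1 then some (start, i+1)
        else fbjsGoA rest (i+1) in_str esc (depth-1) start
      else fbjsGoA rest (i+1) in_str esc depth start
    else fbjsGoA rest (i+1) in_str esc depth start

def first_balanced_json_span (s : String) : Option (Int × Int) :=
  fbjsGoA s.toList 0 false false 0 (-1)

-- ===== PORT B =====
-- Pass 1: collect (index, char) for braces outside strings.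
def fbjsCollect : List Char → Int → Bool → Bool → List (Int × Char)
  | [], _, _, _ => []
  | ch :: rest, i, in_str, esc =>
    if in_str then
      if esc then fbjsCollect rest (i+1) in_str false
      else if ch = '\\' then fbjsCollect rest (i+1) in_str true
      else if ch = '"' then fbjsCollect rest (i+1) false esc
      else fbjsCollect rest (i+1) in_str esc
    else if ch = '"' then fbjsCollect rest (i+1) true esc
    else if ch = '{' ∨ ch = '}' then (i, ch) :: fbjsCollect rest (i+1) in_str esc
    else fbjsCollect rest (i+1) in_str esc

-- Pass 2: balance the token list.
def fbjsBalance : List (Int × Char) → Int → Int → Option (Int × Int)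
  | [], _, _ => none
  | (i, ch) :: rest, depth, start =>
    if ch = '{' then fbjsBalance rest (depth+1) (if depth = 0 then i else start)
    else if depth > 0 then
      if depth - 1 = 0 ∧ start ≠ -1 then some (start, i+1)
      else fbjsBalance rest (depth-1) start
    else fbjsBalance rest depth start

def first_balanced_json_span_alt (s : String) : Option (Int × Int) :=
  fbjsBalance (fbjsCollect s.toList 0 false false) 0 (-1)

-- ===== PRECONDITION & SPEC =====
def Spec_first_balanced_json_span (s : String) (out : Option (Int × Int)) : Prop := out = first_balanced_json_span_alt s
instance (s : String) (out : Option (Int × Int)) : Decidable (Spec_first_balanced_json_span s out) := by unfold Spec_first_balanced_json_span; infer_instance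

-- ===== CLAIM (what is proved, stated in full; the proofs are below) =====
def Claim_equal_first_balanced_json_span : Prop := ∀ (s : String), Dom_first_balanced_json_span s → Spec_first_balanced_json_span s (first_balanced_json_span s)

-- ===== LEMMAS AND PROOFS =====
theorem fbjsGoA_eq (cs : List Char) :
    ∀ (i : Int) (in_str esc : Bool) (depth start : Int),
      fbjsGoA cs i in_str esc depth start
        = fbjsBalance (fbjsCollect cs i in_str esc) depth start := by
  induction cs with
  | nil => intro i in_str esc depth start; rfl
  | cons ch rest ih =>
    intro i in_str esc depth start
    by_cases hs : in_str = true
    · subst hs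
      by_cases he : esc = true
      · subst he; simp [fbjsGoA, fbjsCollect, ih]
      · simp only [Bool.not_eq_true] at he; subst he
        by_cases hb : ch = '\\'
        · simp [fbjsGoA, fbjsCollect, hb, ih]
        · by_cases hq : ch = '"'
          · simp [fbjsGoA, fbjsCollect, hq, ih]
          · simp [fbjsGoA, fbjsCollect, hb, hq, ih]
    · simp only [Bool.not_eq_true] at hs; subst hs
      by_cases hq : ch = '"'
      · simp [fbjsGoA, fbjsCollect, hq, ih]
      · by_cases ho : ch = '{'
        · simp [fbjsGoA, fbjsCollect, fbjsBalance, ho, ih]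
        · by_cases hc : ch = '}'
          · by_cases hd : depth > 0
            · by_cases hr : depth - 1 = 0 ∧ start ≠ -1
              · simp [fbjsGoA, fbjsCollect, fbjsBalance, hc, hd, hr]
              · simp [fbjsGoA, fbjsCollect, fbjsBalance, hc, hd, hr, ih]
            · simp [fbjsGoA, fbjsCollect, fbjsBalance, hc, hd, ih]
          · simp [fbjsGoA, fbjsCollect, hq, ho, hc, ih]

-- ===== VERDICT (by name: the statement is the Claim_ definition above) =====
theorem first_balanced_json_span_spec : Claim_equal_first_balanced_json_span := by
  intro s _
  unfold Spec_first_balanced_json_span first_balanced_json_span first_balanced_json_span_alt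
  exact fbjsGoA_eq s.toList 0 false false 0 (-1)
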